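-- pv_equiv track=rewrite | github.com/Runbin-tang/The-source-of-HIV-CRFs-prediction | test_voting.py | judgelabels
-- ===== SOURCE A (Python) =====
-- from collections import Counter
--
-- def judgelabels(templabel):   # Voting the predicted result of 3 classifiers
--     a=[]; #save 3 classifiers predict labels to combine strings. such as 1label=['A','C'],2label=['C','E'] a=['AC','CE']
--     for i in range(3):
--         lab='';
--         c=sorted(templabel[i])  #sorte the labels
--         for j in range(len(c)):
--             lab=lab+c[j]        # combine the labels
--         a.append(lab)
--     Cou=Counter(a)
--     la=max(zip(Cou.values(), Cou.keys()))[1] #most times(>=2) label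
--     if Cou[la]>1:
--         pos=a.index(la)   #pos is the position of first times occurence in a
--
--         return templabel[pos]
--
--     else:   # if the combine labels occurence times=1, make the all labels, choose the detail labels if times >1
--         aa=[];b=[];
--         for i in range(len(templabel)):
--             for j in range(len(templabel[i])):
--                 aa.append(templabel[i][j])
--         Ca=Counter(aa)  #statistics a
--         for i in Ca.keys():
--             if Ca[i]>1:
--                 b.append(i)
--         return b
-- ===== SOURCE B (Python) =====
-- def judgelabels(templabel):
--     # Boyer-Moore majority vote on the three sorted-join signatures; in the
--     # no-majority case a seen/dup set pass (no counting) in first-appearance order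
--     sigs = [''.join(sorted(templabel[i])) for i in range(3)]
--     cand, cnt = None, 0
--     for s in sigs:
--         if cnt == 0:
--             cand, cnt = s, 1
--         elif s == cand:
--             cnt += 1
--         else:
--             cnt -= 1
--     if sum(s == cand for s in sigs) > 1:
--         for i, s in enumerate(sigs):
--             if s == cand:
--                 return templabel[i]
--     seen = set()
--     dups = set()
--     order = []
--     for labs in templabel:
--         for lab in labs:
--             if lab in seen:
--                 dups.add(lab)
--             else:
--                 seen.add(lab)
--                 order.append(lab)
--     return [lab for lab in order if lab in dups]
-- ===== Notes on version B (the rewrite author's own statement) =====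
-- stated objective: alternative
-- what changed: The majority signature is found by a Boyer-Moore voting pass with verify-and-first-index instead of Counter/max/zip/index, and the no-majority fallback tracks seen/duplicate sets plus a first-appearance order list (no counts at all) instead of building a Counter and filtering keys by count>1.
import Mathlib
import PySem

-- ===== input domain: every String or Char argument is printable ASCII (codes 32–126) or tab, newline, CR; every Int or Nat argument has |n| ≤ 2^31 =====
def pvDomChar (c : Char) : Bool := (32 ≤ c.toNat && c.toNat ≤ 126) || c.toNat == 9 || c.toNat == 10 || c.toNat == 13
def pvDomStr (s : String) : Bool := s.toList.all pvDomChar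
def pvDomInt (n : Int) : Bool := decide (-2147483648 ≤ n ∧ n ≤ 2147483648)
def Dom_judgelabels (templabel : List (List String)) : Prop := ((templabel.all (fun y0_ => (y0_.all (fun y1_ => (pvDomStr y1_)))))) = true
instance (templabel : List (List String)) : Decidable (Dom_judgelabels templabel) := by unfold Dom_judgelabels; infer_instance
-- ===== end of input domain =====

-- B finds the majority signature with a Boyer-Moore voting pass (verify, then first index) instead of
-- A's Counter/max/zip/index, and the no-majority fallback tracks seen/duplicate sets in one pass with no
-- counting; objective: alternative (same cost, different algorithm).


-- ===== PORT A =====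
-- Python's '<' on strings: code-point lexicographic (exact for all characters).
def pvChLt : List Char → List Char → Bool
  | _, [] => false
  | [], _ :: _ => true
  | a :: as, b :: bs => if a < b then true else if b < a then false else pvChLt as bs

-- Python's '<' on the (count, signature) pairs compared by max(zip(Cou.values(), Cou.keys())).
def pvPairLt (m x : Int × List Char) : Bool := m.1 < x.1 || (m.1 == x.1 && pvChLt m.2 x.2)

-- the inner loop of A: lab = ''; for j in range(len(c)): lab = lab + c[j]  (c = sorted(row));
-- the growing string lab is represented as its List Char (exact: String ≅ List Char).
def pvSigA (row : List String) : List Char :=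
  let c := PySem.List.sorted row (fun x => x) false
  (PySem.List.pyRange 0 (PySem.List.len c) 1).foldl
    (fun lab j => lab ++ (PySem.List.pyGetD c j "").toList) []

-- A's else branch: flatten ALL of templabel by index loops, count, keep labels with count > 1
def pvElseA (templabel : List (List String)) : List String :=
  let aa := (PySem.List.pyRange 0 (PySem.List.len templabel) 1).foldl
    (fun acc i =>
      let row := PySem.List.pyGetD templabel i []
      (PySem.List.pyRange 0 (PySem.List.len row) 1).foldl
        (fun acc2 j => acc2 ++ [PySem.List.pyGetD row j ""]) acc) []
  let ca := PySem.Dict.counter aa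
  ca.keys.foldl (fun b k => if ca.getD k 0 > 1 then b ++ [k] else b) []

def judgelabels (templabel : List (List String)) : List String :=
  let a := (PySem.List.pyRange 0 3 1).map (fun i => pvSigA (PySem.List.pyGetD templabel i []))
  let cou := PySem.Dict.counter a
  -- la = max(zip(Cou.values(), Cou.keys()))[1]  (Python max: first element, then fold with '<')
  let la : List Char :=
    match cou.values.zip cou.keys with
    | [] => []   -- unreachable: a always has 3 elements
    | p :: rest => (rest.foldl (fun m x => if pvPairLt m x then x else m) p).2
  if cou.getD la 0 > 1 then
    PySem.List.pyGetD templabel (((PySem.List.index? a la).getD 0 : Nat) : Int) []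
  else pvElseA templabel

-- ===== PORT B =====
-- ''.join(sorted(row)), the signature as a List Char (exact: String ≅ List Char)
def pvSigB (row : List String) : List Char :=
  PySem.Chars.join [] ((PySem.List.sorted row (fun x => x) false).map String.toList)

-- one step of Source B's Boyer-Moore loop; state = (cand, cnt), cand starts as None
def pvBM (st : Option (List Char) × Int) (s : List Char) : Option (List Char) × Int :=
  if st.2 == 0 then (some s, 1)
  else if (some s : Option (List Char)) == st.1 then (st.1, st.2 + 1)
  else (st.1, st.2 - 1)

-- one label of Source B's no-majority pass; state = (seen, dups, order)
def pvDupStep (st : PySem.Set String × PySem.Set String × List String) (lab : String) :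
    PySem.Set String × PySem.Set String × List String :=
  if PySem.Set.contains st.1 lab then (st.1, PySem.Set.add st.2.1 lab, st.2.2)
  else (PySem.Set.add st.1 lab, st.2.1, st.2.2 ++ [lab])

-- Source B's no-majority pass over every label of templabel, then filter order by dups
def pvDupPass (templabel : List (List String)) : List String :=
  let st := templabel.foldl (fun st labs => labs.foldl pvDupStep st)
    ((PySem.Set.empty : PySem.Set String), (PySem.Set.empty : PySem.Set String), ([] : List String))
  st.2.2.filter (fun lab => PySem.Set.contains st.2.1 lab)

def judgelabels_alt (templabel : List (List String)) : List String :=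
  let sigs := (PySem.List.pyRange 0 3 1).map (fun i => pvSigB (PySem.List.pyGetD templabel i []))
  let st := sigs.foldl pvBM ((none : Option (List Char)), (0 : Int))
  if sigs.countP (fun s => (some s : Option (List Char)) == st.1) > 1 then
    match sigs.findIdx? (fun s => (some s : Option (List Char)) == st.1) with
    | some i => PySem.List.pyGetD templabel (i : Int) []
    | none => pvDupPass templabel   -- the Python for-loop falls through when nothing matches
  else pvDupPass templabel

-- ===== PRECONDITION & SPEC =====
-- A indexes templabel[0], templabel[1], templabel[2]; on fewer than 3 rows it raises IndexError
-- (and so does B) — those inputs are excluded, everything else is admitted.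
def Pre_judgelabels (templabel : List (List String)) : Prop := 3 ≤ templabel.length
instance (templabel : List (List String)) : Decidable (Pre_judgelabels templabel) := by unfold Pre_judgelabels; infer_instance
def pvWitness_judgelabels : List (List String) := [["A"], ["B"], ["A"]]

def Spec_judgelabels (templabel : List (List String)) (out : List String) : Prop := out = judgelabels_alt templabel
instance (templabel : List (List String)) (out : List String) : Decidable (Spec_judgelabels templabel out) := by unfold Spec_judgelabels; infer_instance

-- ===== CLAIM (what is proved, stated in full; the proofs are below) =====
def Claim_equal_judgelabels : Prop := ∀ (templabel : List (List String)), Dom_judgelabels templabel → Pre_judgelabels templabel → Spec_judgelabels templabel (judgelabels templabel)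

-- ===== LEMMAS AND PROOFS =====

-- ''.join with empty separator flattens
theorem pv_join_nil_flatten (L : List (List Char)) : PySem.Chars.join [] L = L.flatten := by
  induction L with
  | nil => rfl
  | cons x t ih =>
    cases t with
    | nil => simp [PySem.Chars.join, List.intercalate]
    | cons y s => simp_all [PySem.Chars.join, List.intercalate, List.intersperse]

-- the two signature computations agree
theorem pv_sig_eq (row : List String) : pvSigA row = pvSigB row := by
  unfold pvSigA pvSigB
  rw [PySem.List.foldl_pyRange_zero_pyGetD (PySem.List.sorted row (fun x => x) false) ""
        (fun lab s => lab ++ s.toList) [],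
      PySem.List.foldl_append_eq_flatMap String.toList, List.flatMap_def, pv_join_nil_flatten]
  simp

-- invariant of B's seen/dups/order loop: the order list mirrors the seen set, and
-- membership in dups means 'already in seen, or duplicated in the suffix'
theorem pv_dup_inv (aa : List String) (s d : List String) :
    (aa.foldl pvDupStep (s, d, s)).1 = PySem.Set.update s aa ∧
    (aa.foldl pvDupStep (s, d, s)).2.2 = PySem.Set.update s aa ∧
    ∀ x, x ∈ (aa.foldl pvDupStep (s, d, s)).2.1 ↔ (x ∈ d ∨ (x ∈ s ∧ x ∈ aa) ∨ 2 ≤ aa.count x) := by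
  induction aa generalizing s d with
  | nil => simp [PySem.Set.update]
  | cons lab aa ih =>
    by_cases hc : lab ∈ s
    · have hstep : pvDupStep (s, d, s) lab = (s, PySem.Set.add d lab, s) := by
        simp [pvDupStep, hc]
      rw [List.foldl_cons, hstep]
      obtain ⟨h1, h2, h3⟩ := ih s (PySem.Set.add d lab)
      refine ⟨?_, ?_, ?_⟩
      · rw [h1, PySem.Set.update_cons, PySem.Set.add_of_mem hc]
      · rw [h2, PySem.Set.update_cons, PySem.Set.add_of_mem hc]
      · intro x
        rw [h3 x, PySem.Set.mem_add]
        by_cases hx : x = lab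
        · subst hx; simp [hc]
        · have hx' : ¬ lab = x := fun h => hx h.symm
          simp [hx, hx']
    · have hstep : pvDupStep (s, d, s) lab = (s ++ [lab], d, s ++ [lab]) := by
        simp [pvDupStep, hc]
      rw [List.foldl_cons, hstep]
      obtain ⟨h1, h2, h3⟩ := ih (s ++ [lab]) d
      have hupd : PySem.Set.update s (lab :: aa) = PySem.Set.update (s ++ [lab]) aa := by
        rw [PySem.Set.update_cons, PySem.Set.add_of_not_mem hc]
      refine ⟨by rw [h1, hupd], by rw [h2, hupd], ?_⟩
      intro x
      rw [h3 x]
      by_cases hx : x = lab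
      · subst hx
        have hm : x ∈ aa ↔ 0 < aa.count x := List.count_pos_iff.symm
        rw [List.count_cons_self]
        simp only [List.mem_cons, List.mem_append, hm, iff_false_intro hc, false_or, true_or, and_true, true_and]
        by_cases hd : x ∈ d <;> simp [hd]
        intro h; exact List.count_pos_iff.mp (by omega)
      · have hx' : ¬ lab = x := fun h => hx h.symm
        simp [hx, hx']

-- A's else branch equals B's no-majority pass
theorem pv_else_eq (templabel : List (List String)) : pvElseA templabel = pvDupPass templabel := by
  unfold pvElseA pvDupPass
  have haa : (PySem.List.pyRange 0 (PySem.List.len templabel) 1).foldl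
      (fun acc i =>
        let row := PySem.List.pyGetD templabel i []
        (PySem.List.pyRange 0 (PySem.List.len row) 1).foldl
          (fun acc2 j => acc2 ++ [PySem.List.pyGetD row j ""]) acc) [] = templabel.flatten := by
    rw [PySem.List.foldl_pyRange_zero_pyGetD templabel []
          (fun acc row => (PySem.List.pyRange 0 (PySem.List.len row) 1).foldl
            (fun acc2 j => acc2 ++ [PySem.List.pyGetD row j ""]) acc) []]
    have : ∀ (row : List String) (acc : List String),
        (PySem.List.pyRange 0 (PySem.List.len row) 1).foldl
          (fun acc2 j => acc2 ++ [PySem.List.pyGetD row j ""]) acc = acc ++ row := by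
      intro row acc
      rw [PySem.List.foldl_pyRange_zero_pyGetD row "" (fun acc2 x => acc2 ++ [x]) acc,
          PySem.List.foldl_append_singleton_eq_self]
    simp only [this]
    rw [PySem.List.foldl_append_eq_flatten]
    simp
  simp only [haa]
  rw [← List.foldl_flatten]
  obtain ⟨h1, h2, h3⟩ := pv_dup_inv templabel.flatten [] []
  simp only [PySem.Set.empty] at h2 h3 ⊢
  rw [h2]
  rw [PySem.List.foldl_append_ite_eq_filter, PySem.Dict.keys_counter,
      PySem.Set.update_nil_left]
  apply List.filter_congr
  intro k _
  rw [PySem.Dict.getD_counter]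
  by_cases hk : 2 ≤ templabel.flatten.count k
  · have hkd : k ∈ (List.foldl pvDupStep ([], [], []) templabel.flatten).2.1 := by
      rw [h3 k]; tauto
    simp [hkd]
    omega
  · have hkd : k ∉ (List.foldl pvDupStep ([], [], []) templabel.flatten).2.1 := by
      rw [h3 k]; simp; omega
    simp [hkd]
    omega

-- ===== VERDICT (by name: the statement is the Claim_ definition above) =====
theorem judgelabels_spec : Claim_equal_judgelabels := by
  intro templabel _hdom hpre
  unfold Pre_judgelabels at hpre
  obtain ⟨t0, t1, t2, rest, rfl⟩ : ∃ t0 t1 t2 rest, templabel = t0 :: t1 :: t2 :: rest := by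
    match templabel with
    | t0 :: t1 :: t2 :: rest => exact ⟨t0, t1, t2, rest, rfl⟩
    | [] | [_] | [_, _] => simp at hpre
  unfold Spec_judgelabels judgelabels judgelabels_alt
  have hr3 : PySem.List.pyRange 0 3 1 = [0, 1, 2] := by decide
  have g0 : PySem.List.pyGetD (t0 :: t1 :: t2 :: rest) 0 [] = t0 := by simp [pysem]
  have g1 : PySem.List.pyGetD (t0 :: t1 :: t2 :: rest) 1 [] = t1 := by simp [pysem]
  have g2 : PySem.List.pyGetD (t0 :: t1 :: t2 :: rest) 2 [] = t2 := by simp [pysem]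
  rw [hr3]
  simp only [List.map_cons, List.map_nil, g0, g1, g2, pv_sig_eq]
  by_cases h01 : pvSigB t0 = pvSigB t1
  · rw [← h01]
    by_cases h02 : pvSigB t0 = pvSigB t2
    · -- all three signatures equal
      rw [← h02]
      simp [PySem.Dict.counter, PySem.Dict.modify, PySem.Dict.insert, PySem.Dict.contains,
        PySem.Dict.getD, PySem.Dict.get?, PySem.Dict.keys, PySem.Dict.values, PySem.Dict.empty,
        pvPairLt, PySem.List.index?, List.idxOf?, List.findIdx?_cons, pvBM, g0]
    · -- sig0 = sig1 ≠ sig2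
      have h20 : ¬ pvSigB t2 = pvSigB t0 := fun h => h02 h.symm
      simp [PySem.Dict.counter, PySem.Dict.modify, PySem.Dict.insert, PySem.Dict.contains,
        PySem.Dict.getD, PySem.Dict.get?, PySem.Dict.keys, PySem.Dict.values, PySem.Dict.empty,
        pvPairLt, PySem.List.index?, List.idxOf?, List.findIdx?_cons, pvBM, h02, h20, g0]
  · have h10 : ¬ pvSigB t1 = pvSigB t0 := fun h => h01 h.symm
    by_cases h02 : pvSigB t0 = pvSigB t2
    · -- sig0 = sig2 ≠ sig1
      rw [← h02]
      simp [PySem.Dict.counter, PySem.Dict.modify, PySem.Dict.insert, PySem.Dict.contains,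
        PySem.Dict.getD, PySem.Dict.get?, PySem.Dict.keys, PySem.Dict.values, PySem.Dict.empty,
        pvPairLt, PySem.List.index?, List.idxOf?, List.findIdx?_cons, pvBM, h01, h10, g0]
    · have h20 : ¬ pvSigB t2 = pvSigB t0 := fun h => h02 h.symm
      by_cases h12 : pvSigB t1 = pvSigB t2
      · -- sig1 = sig2 ≠ sig0
        rw [← h12]
        simp [PySem.Dict.counter, PySem.Dict.modify, PySem.Dict.insert, PySem.Dict.contains,
          PySem.Dict.getD, PySem.Dict.get?, PySem.Dict.keys, PySem.Dict.values, PySem.Dict.empty,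
          pvPairLt, PySem.List.index?, List.idxOf?, List.findIdx?_cons, pvBM, h01, h10, g1]
      · -- all three signatures distinct: both sides fall through to the else branches
        have h21 : ¬ pvSigB t2 = pvSigB t1 := fun h => h12 h.symm
        by_cases hb1 : pvChLt (pvSigB t0) (pvSigB t1) = true <;>
        by_cases hb2 : pvChLt (pvSigB t1) (pvSigB t2) = true <;>
        by_cases hb3 : pvChLt (pvSigB t0) (pvSigB t2) = true <;>
        simp [PySem.Dict.counter, PySem.Dict.modify, PySem.Dict.insert, PySem.Dict.contains,
          PySem.Dict.getD, PySem.Dict.get?, PySem.Dict.keys, PySem.Dict.values, PySem.Dict.empty,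
          pvPairLt, pvBM, h01, h02, h10, h12, hb1, hb2, hb3, pv_else_eq]
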